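-- pv_equiv track=rewrite | github.com/Iheb-prepa/License-plate-detection | postprocess_results.py | extract_license_plate
-- ===== SOURCE A (Python) =====
-- from collections import Counter
--
-- def extract_license_plate(lp_dict):
--     """
--     For a given dictionary of possible license plates (with their occurences) for a given car,
--     find the most likely license plate, Example for car with the id 2
--     2:
--         JA13NRU: 1
--         NA13MRU: 3
--         NA13NRU: 6
--     Most likely license plate: NA13NRU
--     The algorithm works by finding the most occurring letter/number in each position of the strings.
--     """
--     # Find the maximum key length
--     max_length = max(len(key) for key in lp_dict.keys())
--
--     # Create a list to store the character counters for each position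
--     position_counters = [Counter() for _ in range(max_length)]
--
--     # Count character occurrences for each position
--     for key, count in lp_dict.items():
--         for i, char in enumerate(key):
--             position_counters[i][char] += count
--
--     # Construct the resulting string
--     result_lp = ''.join(counter.most_common(1)[0][0] for counter in position_counters)
--     return result_lp
-- ===== SOURCE B (Python) =====
-- def extract_license_plate(lp_dict):
--     """
--     Most likely plate: at each position, the character whose summed occurrence
--     count across candidate plates is highest (earliest candidate wins ties).
--     Brute-force per position: no counters, just a keyed max over the distinct
--     characters seen at that position.
--     """
--     items = list(lp_dict.items())
--
--     def weight(i, ch):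
--         return sum(n for k, n in items if i < len(k) and k[i] == ch)
--
--     plate = []
--     for i in range(max(len(k) for k in lp_dict)):
--         seen = []
--         for k, _ in items:
--             if i < len(k) and k[i] not in seen:
--                 seen.append(k[i])
--         plate.append(max(seen, key=lambda ch: weight(i, ch)))
--     return ''.join(plate)
-- ===== Notes on version B (the rewrite author's own statement) =====
-- stated objective: alternative
-- what changed: B drops the Counter data structure entirely: for each position it takes a keyed max over the distinct characters seen there, computing each character's weight by a direct sum over the candidates, instead of A's single scatter pass into a preallocated list of per-position Counters; Pre_ excludes only the empty dict, on which both raise ValueError.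
-- outside the precondition, e.g. on extract_license_plate({}): A raises ValueError, B raises ValueError
import Mathlib
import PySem

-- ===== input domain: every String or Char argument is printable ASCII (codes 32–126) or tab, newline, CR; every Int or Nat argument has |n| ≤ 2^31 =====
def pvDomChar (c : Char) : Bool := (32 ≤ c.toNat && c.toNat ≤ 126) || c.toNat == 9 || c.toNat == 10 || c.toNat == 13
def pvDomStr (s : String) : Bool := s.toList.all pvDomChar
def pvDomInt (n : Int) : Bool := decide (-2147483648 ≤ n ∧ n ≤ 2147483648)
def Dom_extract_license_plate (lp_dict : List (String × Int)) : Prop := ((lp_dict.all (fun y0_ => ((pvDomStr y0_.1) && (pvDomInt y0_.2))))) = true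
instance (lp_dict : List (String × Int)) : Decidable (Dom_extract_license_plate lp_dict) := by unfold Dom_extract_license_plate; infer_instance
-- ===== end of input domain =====

-- B drops the Counter data structure: per position it takes a keyed max over the distinct
-- characters seen there, each weighed by a direct sum over the candidates (alternative algorithm).

-- ===== PORT A =====
-- Counter.most_common(1)[0][0]: the first key attaining the maximal count (stable sort
-- descending by count); none exactly when the counter is empty (Python: IndexError).
def pvMostCommon1 (c : PySem.Dict Char Int) : Option Char :=
  (PySem.List.max? c.items (fun kv => kv.2)).map (·.1)

def extract_license_plate (lp_dict : List (String × Int)) : String :=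
  let d := PySem.Dict.ofList lp_dict
  match PySem.List.max? (d.keys.map (fun k => PySem.Str.len k)) (fun x => x) with
  | none => ""      -- Python: max() raises ValueError on an empty dict; excluded by Pre_
  | some maxLenI =>
    -- position_counters = [Counter() for _ in range(max_length)]
    -- for key, count in lp_dict.items(): for i, char in enumerate(key): position_counters[i][char] += count
    let counters := d.items.foldl
      (fun cs kv => (PySem.List.enumerate kv.1.toList 0).foldl
        (fun cs ic => cs.modify ic.1.toNat (fun c => c.modify ic.2 0 (· + kv.2))) cs)
      (List.replicate maxLenI.toNat PySem.Dict.empty)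
    String.ofList (counters.filterMap pvMostCommon1)

-- ===== PORT B =====
def extract_license_plate_alt (lp_dict : List (String × Int)) : String :=
  let items := (PySem.Dict.ofList lp_dict).items
  -- weight(i, ch) = sum(n for k, n in items if i < len(k) and k[i] == ch)
  -- ('i < len(k) and k[i] == ch' for a Nat index i is exactly k.toList[i]? = some ch)
  let weight := fun (i : Nat) (ch : Char) =>
    ((items.filter (fun kv => kv.1.toList[i]? == some ch)).map (·.2)).sum
  match PySem.List.max? (((PySem.Dict.ofList lp_dict).keys).map (fun k => PySem.Str.len k)) (fun x => x) with
  | none => ""    -- Python: max() raises ValueError on an empty dict; excluded by Pre_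
  | some L =>
    -- seen: first-occurrence list of the characters at position i ('not in seen: append' = Set.add);
    -- max(seen, key=…) = PySem.List.max? (first maximal element); seen is never empty for i < L.
    let plate := (List.range L.toNat).filterMap (fun i =>
      let seen := items.foldl (fun s kv =>
        match kv.1.toList[i]? with
        | some ch => PySem.Set.add s ch
        | none => s) PySem.Set.empty
      PySem.List.max? seen (weight i))
    String.ofList plate

-- ===== PRECONDITION & SPEC =====
-- Pre_ excludes only the empty dict, on which both Pythons raise ValueError (max of an empty sequence).
def Pre_extract_license_plate (lp_dict : List (String × Int)) : Prop := lp_dict ≠ []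
instance (lp_dict : List (String × Int)) : Decidable (Pre_extract_license_plate lp_dict) := by unfold Pre_extract_license_plate; infer_instance
def pvWitness_extract_license_plate : (List (String × Int)) := [("AB12", 2), ("CB12", 1)]
def Spec_extract_license_plate (lp_dict : List (String × Int)) (out : String) : Prop := out = extract_license_plate_alt lp_dict
instance (lp_dict : List (String × Int)) (out : String) : Decidable (Spec_extract_license_plate lp_dict out) := by unfold Spec_extract_license_plate; infer_instance

-- ===== CLAIM (what is proved, stated in full; the proofs are below) =====
def Claim_equal_extract_license_plate : Prop := ∀ (lp_dict : List (String × Int)), Dom_extract_license_plate lp_dict → Pre_extract_license_plate lp_dict → Spec_extract_license_plate lp_dict (extract_license_plate lp_dict)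

-- ===== LEMMAS AND PROOFS =====

-- The per-position update a single (key, count) item contributes to position i.
def pvG (i : Nat) (c : PySem.Dict Char Int) (kv : String × Int) : PySem.Dict Char Int :=
  match kv.1.toList[i]? with
  | some ch => c.modify ch 0 (· + kv.2)
  | none => c

-- The (character, count) pairs the items contribute to position i.
def pvPs (i : Nat) (items : List (String × Int)) : List (Char × Int) :=
  items.filterMap (fun kv => (kv.1.toList[i]?).map (fun ch => (ch, kv.2)))

-- A's inner scatter loop, observed at one position i, as a fold of the matching updates.
theorem pv_foldl_modify_getElem? (ps : List (Int × Char)) (v : Int)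
    (cs : List (PySem.Dict Char Int)) (i : Nat) :
    (ps.foldl (fun cs ic => cs.modify ic.1.toNat (fun c => c.modify ic.2 0 (· + v))) cs)[i]? =
    (cs[i]?).map (fun c =>
      (ps.filter (fun ic => ic.1.toNat == i)).foldl (fun c ic => c.modify ic.2 0 (· + v)) c) := by
  induction ps generalizing cs with
  | nil => cases hx : cs[i]? <;> simp [hx]
  | cons hd tl ih =>
    simp only [List.foldl_cons, List.filter_cons]
    rw [ih, List.getElem?_modify]
    by_cases h : hd.1.toNat = i
    · cases cs[i]? <;> simp [h]
    · cases cs[i]? <;> simp [h]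

-- The updates of one key that hit position i: exactly its character at index i, if any.
theorem pv_filter_enumerate (xs : List Char) (s i : Nat) :
    (PySem.List.enumerate xs (s : Int)).filter (fun ic => ic.1.toNat == i) =
    if s ≤ i then (xs[i - s]?.map (fun ch => ((i : Int), ch))).toList else [] := by
  induction xs generalizing s with
  | nil => simp [PySem.List.enumerate_nil]
  | cons x t ih =>
    rw [PySem.List.enumerate_cons, List.filter_cons]
    rw [show ((s : Int) + 1) = (((s + 1 : Nat)) : Int) by push_cast; ring, ih (s + 1)]
    by_cases hs : s = i
    · subst hs
      simp
    · have h1 : ((s : Int).toNat == i) = false := by simp [hs]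
      rw [h1]
      simp only [Bool.false_eq_true, if_false]
      by_cases h2 : s ≤ i
      · have h3 : s + 1 ≤ i := by omega
        have h4 : i - s = (i - (s + 1)) + 1 := by omega
        simp [h2, h3, h4]
      · simp [h2, show ¬ s + 1 ≤ i by omega]

-- One item's whole enumerate-loop, observed at position i, is pvG.
theorem pv_inner (kv : String × Int) (cs : List (PySem.Dict Char Int)) (i : Nat) :
    ((PySem.List.enumerate kv.1.toList 0).foldl
      (fun cs ic => cs.modify ic.1.toNat (fun c => c.modify ic.2 0 (· + kv.2))) cs)[i]? =
    cs[i]?.map (fun c => pvG i c kv) := by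
  rw [pv_foldl_modify_getElem?, show (0 : Int) = ((0 : Nat) : Int) from rfl,
    pv_filter_enumerate]
  simp only [Nat.zero_le, if_true, Nat.sub_zero]
  cases hx : kv.1.toList[i]? <;> cases cs[i]? <;> simp [pvG, hx]

-- A's whole item loop, observed at position i.
theorem pv_outer (items : List (String × Int)) (cs : List (PySem.Dict Char Int)) (i : Nat) :
    (items.foldl
      (fun cs kv => (PySem.List.enumerate kv.1.toList 0).foldl
        (fun cs ic => cs.modify ic.1.toNat (fun c => c.modify ic.2 0 (· + kv.2))) cs) cs)[i]? =
    cs[i]?.map (fun c => items.foldl (pvG i) c) := by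
  induction items generalizing cs with
  | nil => cases hx : cs[i]? <;> simp [hx]
  | cons kv tl ih =>
    simp only [List.foldl_cons]
    rw [ih, pv_inner, Option.map_map]
    rfl

-- A's counter row equals the column-indexed family of per-position folds.
theorem pv_countersA (items : List (String × Int)) (L : Nat) :
    items.foldl
      (fun cs kv => (PySem.List.enumerate kv.1.toList 0).foldl
        (fun cs ic => cs.modify ic.1.toNat (fun c => c.modify ic.2 0 (· + kv.2))) cs)
      (List.replicate L PySem.Dict.empty) =
    (List.range L).map (fun i => items.foldl (pvG i) PySem.Dict.empty) := by
  apply List.ext_getElem?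
  intro i
  rw [pv_outer]
  by_cases h : i < L
  · simp [h]
  · simp [h]

-- The per-position fold of pvG is the modify-fold over the contributed pairs.
theorem pv_fold_ps (i : Nat) (items : List (String × Int)) (c : PySem.Dict Char Int) :
    items.foldl (pvG i) c =
    (pvPs i items).foldl (fun d p => d.modify p.1 0 (· + p.2)) c := by
  induction items generalizing c with
  | nil => simp [pvPs]
  | cons kv tl ih =>
    simp only [List.foldl_cons, pvPs, List.filterMap_cons]
    cases h : kv.1.toList[i]? with
    | none => rw [show pvG i c kv = c by simp [pvG, h]]; exact ih c
    | some ch =>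
      rw [show pvG i c kv = c.modify ch 0 (· + kv.2) by simp [pvG, h]]
      simp only [Option.map_some, List.foldl_cons]
      exact ih _

-- Lookup in the modify-fold: the initial value plus the matching pairs' sum.
theorem pv_getD_fold (l : List (Char × Int)) (d : PySem.Dict Char Int) (ch : Char) :
    (l.foldl (fun d p => d.modify p.1 0 (· + p.2)) d).getD ch 0 =
    d.getD ch 0 + ((l.filter (fun p => p.1 == ch)).map (·.2)).sum := by
  induction l generalizing d with
  | nil => simp
  | cons p t ih =>
    simp only [List.foldl_cons, List.filter_cons]
    rw [ih]
    by_cases h : p.1 = ch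
    · simp only [h, beq_self_eq_true, if_true, List.map_cons, List.sum_cons,
        PySem.Dict.getD_modify]
      ring
    · rw [PySem.Dict.getD_modify]
      simp [Ne.symm h, h]

-- B's seen-loop is the running dedup of the contributed characters.
theorem pv_seen_fold (i : Nat) (items : List (String × Int)) (s : PySem.Set Char) :
    items.foldl (fun s kv =>
      match kv.1.toList[i]? with
      | some ch => PySem.Set.add s ch
      | none => s) s =
    ((pvPs i items).map (·.1)).foldl PySem.Set.add s := by
  induction items generalizing s with
  | nil => simp [pvPs]
  | cons kv tl ih =>
    simp only [List.foldl_cons, pvPs, List.filterMap_cons]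
    cases h : kv.1.toList[i]? with
    | none => exact ih s
    | some ch => simp only [Option.map_some, List.map_cons, List.foldl_cons]; exact ih _

-- B's weight filter over the items equals the filter over the contributed pairs.
theorem pv_weight_eq (i : Nat) (items : List (String × Int)) (ch : Char) :
    (items.filter (fun kv => kv.1.toList[i]? == some ch)).map (·.2) =
    ((pvPs i items).filter (fun p => p.1 == ch)).map (·.2) := by
  induction items with
  | nil => simp [pvPs]
  | cons kv tl ih =>
    simp only [List.filter_cons, pvPs, List.filterMap_cons]
    cases h : kv.1.toList[i]? with
    | none => simpa [h] using ih
    | some ch' =>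
      simp only [Option.map_some, List.filter_cons]
      by_cases hc : ch' = ch
      · simpa [hc] using congrArg (List.cons kv.2) ih
      · simpa [hc] using ih

-- max? commutes with map (the key composed through the map).
theorem pv_max?_foldl {α β κ : Type} [LT κ] [DecidableLT κ] (l : List α) (f : α → β)
    (key : β → κ) (acc : Option α) :
    List.foldl (fun acc x => match acc with
      | none => some x
      | some m => if key m < key x then some x else some m) (Option.map f acc) (l.map f) =
    Option.map f (List.foldl (fun acc x => match acc with
      | none => some x
      | some m => if key (f m) < key (f x) then some x else some m) acc l) := by
  induction l generalizing acc with
  | nil => rfl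
  | cons x t ih =>
    simp only [List.map_cons, List.foldl_cons]
    cases acc with
    | none => exact ih (some x)
    | some m =>
      simp only [Option.map_some]
      split_ifs <;> [exact ih (some x); exact ih (some m)]

theorem pv_max?_map {α β κ : Type} [LT κ] [DecidableLT κ] (l : List α) (f : α → β)
    (key : β → κ) :
    PySem.List.max? (l.map f) key = Option.map f (PySem.List.max? l (fun x => key (f x))) := by
  have := pv_max?_foldl l f key none
  simpa [PySem.List.max?] using this

-- The heart: A's per-position most_common equals B's keyed max over the seen characters.
theorem pv_pos (items : List (String × Int)) (i : Nat) :
    pvMostCommon1 (items.foldl (pvG i) PySem.Dict.empty) =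
    PySem.List.max?
      (items.foldl (fun s kv =>
        match kv.1.toList[i]? with
        | some ch => PySem.Set.add s ch
        | none => s) PySem.Set.empty)
      (fun ch => ((items.filter (fun kv => kv.1.toList[i]? == some ch)).map (·.2)).sum) := by
  rw [pv_fold_ps, pv_seen_fold]
  set l := pvPs i items with hl
  have hshape : (l.foldl (fun d p => d.modify p.1 0 (· + p.2)) PySem.Dict.empty) =
      (l.foldl (fun d p => d.modify ((·.1) p) 0 ((fun (_ : PySem.Dict Char Int) (p : Char × Int) => (· + p.2)) d p)) PySem.Dict.empty) := rfl
  have hkeys : (l.foldl (fun d p => d.modify p.1 0 (· + p.2)) PySem.Dict.empty).keys =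
      PySem.Set.ofList (l.map (·.1)) := by
    rw [hshape, PySem.Dict.keys_foldl_modify_key]
    simp [PySem.Set.ofList_eq_foldl, PySem.Set.update]
  have hnodup : (l.foldl (fun d p => d.modify p.1 0 (· + p.2)) PySem.Dict.empty).keys.Nodup := by
    rw [hshape]
    exact PySem.Dict.nodup_keys_foldl_modify_key l (·.1) 0 _ PySem.Dict.empty (by simp)
  unfold pvMostCommon1
  rw [PySem.Dict.items_eq_map_keys _ hnodup 0, hkeys, pv_max?_map, Option.map_map]
  have hofl : PySem.Set.ofList (l.map (·.1)) =
      (l.map (·.1)).foldl PySem.Set.add PySem.Set.empty := PySem.Set.ofList_eq_foldl _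
  rw [← hofl]
  have hcomp : ((fun kv : Char × Int => kv.1) ∘
      fun k => (k, (l.foldl (fun d p => d.modify p.1 0 (· + p.2)) PySem.Dict.empty).getD k 0)) = id := rfl
  rw [hcomp, Option.map_id, id_eq]
  congr 1
  funext ch
  rw [pv_getD_fold, PySem.Dict.getD_empty, pv_weight_eq i items ch, hl]
  ring

-- ===== VERDICT (by name: the statement is the Claim_ definition above) =====
theorem extract_license_plate_spec : Claim_equal_extract_license_plate := by
  intro lp _ _
  unfold Spec_extract_license_plate extract_license_plate extract_license_plate_alt
  cases h : PySem.List.max? (((PySem.Dict.ofList lp).keys).map (fun k => PySem.Str.len k)) (fun x => x) with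
  | none => simp only [h]
  | some L =>
    simp only [h]
    rw [pv_countersA, List.filterMap_map]
    exact congrArg (fun f => String.ofList (List.filterMap f (List.range L.toNat)))
      (funext fun i => pv_pos (PySem.Dict.ofList lp).items i)
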